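-- pv_equiv track=rewrite | github.com/pedrofuentes79/ejercicios_algoritmos_1 | CMS2/mesetaMasLarga_TEST.py | hayMesetaDeLong
-- ===== SOURCE A (Python) =====
-- from typing import List
--
-- def hayMesetaDeLong(l: List[int], n: int) -> bool:
--   for i in range(len(l)):
--     j: int = i + n
--     if n == len(l):
--       return todosIguales(l)
--     elif j > len(l):
--       return False
--     elif todosIguales(l[i:j]):
--       return True
--
-- def todosIguales(l: List[int]) -> bool:
--   if len(l) == 0:
--     return False
--
--   primero = l[0]
--   for item in l[1:]:
--       if item != primero:
--           return False
--
--   return True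
-- ===== SOURCE B (Python) =====
-- from typing import List
--
-- def hayMesetaDeLong(l: List[int], n: int) -> bool:
--     # single pass: track length of the current run of equal elements
--     run = 0
--     prev = None
--     for x in l:
--         run = run + 1 if run and x == prev else 1
--         prev = x
--         if run >= n:
--             return True
--     return False
-- ===== Notes on version B (the rewrite author's own statement) =====
-- stated objective: faster
-- what changed: Replaces the window scan that re-checks an n-slice at every start index with a single pass maintaining the current run length of equal elements.
-- outside the precondition, e.g. on hayMesetaDeLong([], 3): A returns None, B returns False; on hayMesetaDeLong([1, 2], 0): A returns None, B returns True
import Mathlib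
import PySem

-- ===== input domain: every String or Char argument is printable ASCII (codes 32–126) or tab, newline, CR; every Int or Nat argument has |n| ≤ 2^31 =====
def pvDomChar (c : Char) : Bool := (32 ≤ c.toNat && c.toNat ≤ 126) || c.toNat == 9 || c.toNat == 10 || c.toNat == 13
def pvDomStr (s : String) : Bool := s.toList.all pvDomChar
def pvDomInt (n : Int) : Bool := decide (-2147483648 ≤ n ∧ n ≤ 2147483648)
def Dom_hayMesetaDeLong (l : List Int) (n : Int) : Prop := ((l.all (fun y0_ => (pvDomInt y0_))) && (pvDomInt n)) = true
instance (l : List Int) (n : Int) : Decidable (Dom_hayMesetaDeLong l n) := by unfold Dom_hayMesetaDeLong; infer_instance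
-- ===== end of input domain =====

-- B replaces A's window-by-window rescan with one pass tracking the current run length (objective: faster).

-- ===== PORT A =====
def todosIgualesLoop (primero : Int) : List Int → Bool
  | [] => true
  | item :: rest => if item ≠ primero then false else todosIgualesLoop primero rest

def todosIguales (l : List Int) : Bool :=
  match l with
  | [] => false
  | primero :: rest => todosIgualesLoop primero rest

def hayMesetaLoop (l : List Int) (n : Int) (i : Nat) : Bool :=
  if i < l.length then
    let j : Int := (i : Int) + n
    if n = (l.length : Int) then todosIguales l
    else if j > (l.length : Int) then false
    else if todosIguales (PySem.List.slice l (some (i : Int)) (some j)) then true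
    else hayMesetaLoop l n (i + 1)
  else false  -- Python falls off the loop and returns None here; such inputs are outside Pre_
termination_by l.length - i

def hayMesetaDeLong (l : List Int) (n : Int) : Bool := hayMesetaLoop l n 0

-- ===== PORT B =====
def runLoop (n : Int) (run : Int) (prev : Option Int) : List Int → Bool
  | [] => false
  | x :: xs =>
    let run' : Int := if run ≠ 0 ∧ some x = prev then run + 1 else 1
    if run' ≥ n then true else runLoop n run' (some x) xs

def hayMesetaDeLong_alt (l : List Int) (n : Int) : Bool := runLoop n 0 none l

-- ===== PRECONDITION & SPEC =====
-- Pre_ excludes l = [] and n ≤ 0: there A's loop finds no window and falls off, returning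
-- None instead of a bool; B naturally returns a bool (False resp. True) on those inputs.
def Pre_hayMesetaDeLong (l : List Int) (n : Int) : Prop := l ≠ [] ∧ 1 ≤ n
instance (l : List Int) (n : Int) : Decidable (Pre_hayMesetaDeLong l n) := by unfold Pre_hayMesetaDeLong; infer_instance
def pvWitness_hayMesetaDeLong : List Int × Int := ([1, 1], 2)

def Spec_hayMesetaDeLong (l : List Int) (n : Int) (out : Bool) : Prop := out = hayMesetaDeLong_alt l n
instance (l : List Int) (n : Int) (out : Bool) : Decidable (Spec_hayMesetaDeLong l n out) := by unfold Spec_hayMesetaDeLong; infer_instance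

-- ===== CLAIM (what is proved, stated in full; the proofs are below) =====
def Claim_equal_hayMesetaDeLong : Prop := ∀ (l : List Int) (n : Int), Dom_hayMesetaDeLong l n → Pre_hayMesetaDeLong l n → Spec_hayMesetaDeLong l n (hayMesetaDeLong l n)

-- ===== LEMMAS AND PROOFS =====

-- reference function both ports are reduced to: scan every start position, check the m-window there
def windowOK (m : Nat) (l : List Int) : Bool := decide (m ≤ l.length) && todosIguales (l.take m)

def naive (m : Nat) : List Int → Bool
  | [] => false
  | x :: xs => windowOK m (x :: xs) || naive m xs

theorem todosIgualesLoop_eq_all (p : Int) (xs : List Int) :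
    todosIgualesLoop p xs = xs.all (fun x => x == p) := by
  induction xs with
  | nil => rfl
  | cons x xs ih =>
    simp only [todosIgualesLoop, List.all_cons]
    by_cases h : x = p <;> simp [h, ih]

theorem naive_false_of_short (m : Nat) (l : List Int) (h : l.length < m) :
    naive m l = false := by
  induction l with
  | nil => rfl
  | cons x xs ih =>
    simp only [naive, windowOK, Bool.or_eq_false_iff, Bool.and_eq_false_iff]
    constructor
    · left; simpa using Nat.not_le.mpr h
    · exact ih (by simpa using Nat.lt_of_succ_lt h)

theorem todosIguales_replicate (k : Nat) (p : Int) (hk : 1 ≤ k) :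
    todosIguales (List.replicate k p) = true := by
  obtain ⟨k', rfl⟩ := Nat.exists_eq_add_of_le hk
  simp [List.replicate_add, List.replicate_one, todosIguales, todosIgualesLoop_eq_all]

theorem todosIguales_mixed (k : Nat) (p x : Int) (ys : List Int) (hx : x ≠ p) :
    todosIguales (List.replicate (k + 1) p ++ x :: ys) = false := by
  rw [List.replicate_succ]
  simp [todosIguales, todosIgualesLoop_eq_all, hx]

theorem naive_peel (m k : Nat) (p x : Int) (xs : List Int) (hx : x ≠ p) (hk : k < m) :
    naive m (List.replicate k p ++ x :: xs) = naive m (x :: xs) := by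
  induction k with
  | zero => simp
  | succ k ih =>
    rw [List.replicate_succ, List.cons_append, naive, ih (Nat.lt_of_succ_lt hk)]
    have hwin : windowOK m (p :: (List.replicate k p ++ x :: xs)) = false := by
      have hrepl : p :: (List.replicate k p ++ x :: xs) = List.replicate (k + 1) p ++ x :: xs := by
        rw [List.replicate_succ]; simp
      rw [hrepl]
      simp only [windowOK, Bool.and_eq_false_iff]
      by_cases hm : m ≤ (List.replicate (k + 1) p ++ x :: xs).length
      · right
        have htake : (List.replicate (k + 1) p ++ x :: xs).take m
            = List.replicate (k + 1) p ++ x :: xs.take (m - (k + 1) - 1) := by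
          rw [List.take_append, List.take_replicate,
            Nat.min_eq_right (Nat.le_of_lt hk)]
          congr 1
          have : m - (List.replicate (k + 1) p).length = (m - (k + 1) - 1) + 1 := by
            simp only [List.length_replicate]; omega
          rw [this, List.take_succ_cons]
        rw [htake]
        exact todosIguales_mixed k p x _ hx
      · left; simpa using hm
    rw [hwin, Bool.false_or]

theorem windowOK_one (x : Int) (xs : List Int) : windowOK 1 (x :: xs) = true := by
  simp [windowOK, todosIguales, todosIgualesLoop]

theorem runLoop_eq_naive (n : Int) (hn : 1 ≤ n) :
    ∀ (xs : List Int) (r : Nat) (p : Int), 1 ≤ r → (r : Int) < n →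
      runLoop n (r : Int) (some p) xs = naive n.toNat (List.replicate r p ++ xs) := by
  intro xs
  induction xs with
  | nil =>
    intro r p hr hrn
    have : (List.replicate r p).length < n.toNat := by
      simp only [List.length_replicate]; omega
    simp [runLoop, naive_false_of_short _ _ this]
  | cons x xs ih =>
    intro r p hr hrn
    have hrz : (r : Int) ≠ 0 := by omega
    by_cases hxp : x = p
    · subst hxp
      have hrepl : List.replicate r x ++ x :: xs = List.replicate (r + 1) x ++ xs := by
        rw [List.replicate_succ']; simp
      have hcons : List.replicate (r + 1) x ++ xs = x :: (List.replicate r x ++ xs) := by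
        rw [List.replicate_succ]; simp
      by_cases hge : (r : Int) + 1 ≥ n
      · have hm : n.toNat = r + 1 := by omega
        rw [runLoop, if_pos (show ((r : Int) ≠ 0 ∧ some x = some x) from ⟨hrz, rfl⟩)]
        rw [if_pos hge, hrepl, hcons, naive]
        have hwin : windowOK n.toNat (x :: (List.replicate r x ++ xs)) = true := by
          rw [← hcons]
          simp only [windowOK, Bool.and_eq_true, decide_eq_true_iff]
          constructor
          · simp only [List.length_append, List.length_replicate]; omega
          · have htk : (List.replicate (r + 1) x ++ xs).take n.toNat = List.replicate (r + 1) x := by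
              rw [List.take_append, List.take_replicate,
                Nat.min_eq_right (by omega)]
              simp [hm]
            rw [htk]
            exact todosIguales_replicate _ _ (by omega)
        rw [hwin, Bool.true_or]
      · rw [runLoop, if_pos (show ((r : Int) ≠ 0 ∧ some x = some x) from ⟨hrz, rfl⟩)]
        rw [if_neg hge]
        have := ih (r + 1) x (by omega) (by push_cast; omega)
        push_cast at this ⊢
        rw [this, hrepl]
    · have hcond : ¬((r : Int) ≠ 0 ∧ some x = some p) := by
        intro h; exact hxp (Option.some.inj h.2)
      by_cases hge : (1 : Int) ≥ n
      · rw [runLoop]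
        simp only [if_neg hcond]
        rw [if_pos hge]
        have hm : n.toNat = 1 := by omega
        obtain ⟨r', rfl⟩ := Nat.exists_eq_add_of_le hr
        rw [hm]
        have hc2 : List.replicate (1 + r') p ++ x :: xs
            = p :: (List.replicate r' p ++ x :: xs) := by
          rw [Nat.add_comm, List.replicate_succ]; simp
        rw [hc2, naive, windowOK_one, Bool.true_or]
      · rw [runLoop]
        simp only [if_neg hcond]
        rw [if_neg hge]
        have h1 := ih 1 x (le_refl 1) (by omega)
        push_cast at h1
        rw [h1, List.singleton_append]
        exact (naive_peel n.toNat r p x xs hxp (by omega)).symm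

theorem alt_eq_naive (l : List Int) (n : Int) (hl : l ≠ []) (hn : 1 ≤ n) :
    hayMesetaDeLong_alt l n = naive n.toNat l := by
  cases l with
  | nil => exact absurd rfl hl
  | cons x xs =>
    rw [hayMesetaDeLong_alt, runLoop]
    have hcond : ¬((0 : Int) ≠ 0 ∧ some x = (none : Option Int)) := by simp
    simp only [if_neg hcond]
    by_cases hge : (1 : Int) ≥ n
    · have hm : n.toNat = 1 := by omega
      rw [if_pos hge, hm, naive, windowOK_one, Bool.true_or]
    · rw [if_neg hge]
      have := runLoop_eq_naive n hn xs 1 x (le_refl 1) (by omega)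
      push_cast at this
      rw [this]; simp

theorem hayMesetaLoop_eq_naive (l : List Int) (n : Int) (hn : 1 ≤ n)
    (hne : n ≠ (l.length : Int)) :
    ∀ (i : Nat), i ≤ l.length → hayMesetaLoop l n i = naive n.toNat (l.drop i) := by
  have key : ∀ (k i : Nat), l.length - i ≤ k → i ≤ l.length →
      hayMesetaLoop l n i = naive n.toNat (l.drop i) := by
    intro k
    induction k with
    | zero =>
      intro i hk hi
      have : i = l.length := by omega
      subst this
      rw [hayMesetaLoop]
      simp [List.drop_length, naive]
    | succ k ih =>
      intro i hk hi
      by_cases hlt : i < l.length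
      · rw [hayMesetaLoop]
        simp only [if_pos hlt, if_neg hne]
        have hdrop : l.drop i = l[i] :: l.drop (i + 1) := List.drop_eq_getElem_cons hlt
        by_cases hj : (i : Int) + n > (l.length : Int)
        · rw [if_pos hj]
          have : (l.drop i).length < n.toNat := by
            rw [List.length_drop]; omega
          exact (naive_false_of_short _ _ this).symm
        · rw [if_neg hj]
          have hcast : (i : Int) + n = (i : Int) + (n.toNat : Int) := by omega
          have hslice : PySem.List.slice l (some (i : Int)) (some ((i : Int) + n))
              = (l.drop i).take n.toNat := by
            rw [hcast]; exact PySem.List.slice_natCast_add l i n.toNat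
          rw [hslice]
          have hle : n.toNat ≤ (l.drop i).length := by rw [List.length_drop]; omega
          have hwin : windowOK n.toNat (l.drop i) = todosIguales ((l.drop i).take n.toNat) := by
            simp only [windowOK, decide_eq_true hle, Bool.true_and]
          conv_rhs => rw [hdrop, naive, ← hdrop, hwin]
          by_cases ht : todosIguales ((l.drop i).take n.toNat) = true
          · simp [ht]
          · simp only [Bool.not_eq_true] at ht
            rw [ht, if_neg (by simp), Bool.false_or]
            exact ih (i + 1) (by omega) (by omega)
      · have : i = l.length := by omega
        subst this
        rw [hayMesetaLoop]
        simp [List.drop_length, naive]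
  intro i hi
  exact key (l.length - i) i (le_refl _) hi

theorem a_eq_naive (l : List Int) (n : Int) (hl : l ≠ []) (hn : 1 ≤ n) :
    hayMesetaDeLong l n = naive n.toNat l := by
  by_cases hne : n = (l.length : Int)
  · cases l with
    | nil => exact absurd rfl hl
    | cons x xs =>
      rw [hayMesetaDeLong, hayMesetaLoop]
      simp only [if_pos (by simp : 0 < (x :: xs).length), if_pos hne]
      have hm : n.toNat = (x :: xs).length := by omega
      rw [naive]
      have htail : naive n.toNat xs = false :=
        naive_false_of_short _ _ (by rw [hm]; simp)
      have hwin : windowOK n.toNat (x :: xs) = todosIguales (x :: xs) := by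
        rw [hm]
        unfold windowOK
        rw [List.take_length, decide_eq_true (le_refl _), Bool.true_and]
      rw [htail, hwin, Bool.or_false]
  · rw [hayMesetaDeLong, hayMesetaLoop_eq_naive l n hn hne 0 (Nat.zero_le _), List.drop_zero]

-- ===== VERDICT (by name: the statement is the Claim_ definition above) =====
theorem hayMesetaDeLong_spec : Claim_equal_hayMesetaDeLong := by
  intro l n _ hpre
  obtain ⟨hl, hn⟩ := hpre
  unfold Spec_hayMesetaDeLong
  rw [a_eq_naive l n hl hn, alt_eq_naive l n hl hn]
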